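-- pv_equiv track=rewrite | github.com/matmut7/autocomplete-server | strings.py | search_with_prefix
-- ===== SOURCE A (Python) =====
-- def search_with_prefix(words, prefix, limit):
--     """Return words starting with prefix, sorted alphabetically."""
--     prefix = prefix.lower()
--     result = []
--
--     if limit == 0:
--         return result
--
--     for word in words:
--         starts_with, word_is_past_prefix = _str_starts_with(word, prefix)
--         if starts_with:
--             result.append(word)
--             if len(result) >= limit:
--                 break
--         elif word_is_past_prefix:
--             break
--
--     return result
--
-- def _str_starts_with(str, prefix):
--     """
--     First return value is whether the string begins with prefix.
--     Second return value is, if the string does not begin with prefix,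
--     whether the word is past the prefix alphabetically.
--     This allows to stop the search as soon as we have no longer any
--     chance to find a matching word.
--     """
--     for index, char in enumerate(prefix):
--         if index >= len(str):
--             # if word is shorter than prefix, it's not a match
--             # but we need to continue search
--             return False, False
--         if char < str[index]:
--             return False, True
--         elif char > str[index]:
--             return False, False
--     return True, None
-- ===== SOURCE B (Python) =====
-- def search_with_prefix(words, prefix, limit):
--     """Return up to limit words starting with prefix, staged:
--     find the scan region, filter matches, truncate."""
--     p = prefix.lower()
--     if limit <= 0:
--         return []
--     # stage 1: the region ends at the first word lexicographically past the
--     # prefix that does not match it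
--     end = len(words)
--     for i, w in enumerate(words):
--         if not w.startswith(p) and p < w:
--             end = i
--             break
--     # stage 2: matches inside the region
--     matches = [w for w in words[:end] if w.startswith(p)]
--     # stage 3: truncate
--     return matches[:limit]
-- ===== Notes on version B (the rewrite author's own statement) =====
-- stated objective: alternative
-- what changed: Replaces A's single fused scan (hand-written per-character prefix/order helper, accumulator with two break conditions) by three staged passes: locate the end of the scan region, filter that region with startswith, then slice off the first limit matches.
-- intended difference: For negative limit with a matching word in the scan region, A's 'len(result) >= limit' break accidentally returns just the first match, while B returns [] because a negative limit naturally means no results. — e.g. on search_with_prefix(["ab"], "a", -1): A returns ["ab"], B returns []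
import Mathlib
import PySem

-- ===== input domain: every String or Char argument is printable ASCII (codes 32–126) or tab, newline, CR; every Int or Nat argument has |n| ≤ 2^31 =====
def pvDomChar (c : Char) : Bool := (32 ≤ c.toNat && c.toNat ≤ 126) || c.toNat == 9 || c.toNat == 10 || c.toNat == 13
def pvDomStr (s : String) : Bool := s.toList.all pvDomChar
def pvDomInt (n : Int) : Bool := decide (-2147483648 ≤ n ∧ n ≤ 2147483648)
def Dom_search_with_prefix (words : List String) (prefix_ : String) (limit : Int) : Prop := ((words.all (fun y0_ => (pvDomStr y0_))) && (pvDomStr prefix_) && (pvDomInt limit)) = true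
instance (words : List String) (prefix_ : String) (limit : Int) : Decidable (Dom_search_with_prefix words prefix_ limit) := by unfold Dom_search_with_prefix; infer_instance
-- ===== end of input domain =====

-- B replaces A's fused scan by three staged passes (region end, filter, truncate); for negative
-- limit with a match in the region A accidentally returns the first match, B returns [] (see D_).

-- ===== PORT A =====
-- _str_starts_with(str, prefix): the enumerate(prefix) loop with the index-in-range check
-- 'index >= len(str)' is ported by hand as simultaneous recursion on (prefix chars, word chars);
-- exact: 'index >= len(str)' is reached exactly when the word chars run out first.
def pyStrStartsWith : List Char → List Char → Bool × Option Bool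
  | [], _ => (true, none)                      -- loop over prefix finished: (True, None)
  | _ :: _, [] => (false, some false)          -- index >= len(str)
  | c :: ps, d :: ws =>
    if c < d then (false, some true)           -- char < str[index]
    else if d < c then (false, some false)     -- char > str[index]
    else pyStrStartsWith ps ws

-- the 'for word in words' loop of A, with its accumulating result list
def searchLoopA (p : List Char) (limit : Int) : List String → List String → List String
  | [], result => result
  | word :: rest, result =>
    let sw := pyStrStartsWith p word.toList
    if sw.1 then
      let result' := result ++ [word]
      if limit ≤ (result'.length : Int) then result' else searchLoopA p limit rest result'
    else if sw.2 = some true then result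
    else searchLoopA p limit rest result

def search_with_prefix (words : List String) (prefix_ : String) (limit : Int) : List String :=
  let p := PySem.Chars.lower prefix_.toList
  if limit = 0 then [] else searchLoopA p limit words []

-- ===== PORT B =====
-- stage 1 of Source B: 'end = len(words); for i, w in enumerate(words): if not w.startswith(p) and p < w: end = i; break'
def findEndB (p : List Char) : List String → Nat → Nat → Nat
  | [], _, d => d
  | w :: rest, i, d =>
    if !(PySem.Chars.startswith w.toList p) && PySem.Chars.strLt p w.toList then i
    else findEndB p rest (i + 1) d

def search_with_prefix_alt (words : List String) (prefix_ : String) (limit : Int) : List String :=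
  let p := PySem.Chars.lower prefix_.toList
  if limit ≤ 0 then []
  else
    let e := findEndB p words 0 words.length
    let hits := (PySem.List.slice words none (some (e : Int))).filter
      (fun w => PySem.Chars.startswith w.toList p)
    PySem.List.slice hits none (some limit)

-- ===== PRECONDITION & SPEC =====
-- For negative limit with a matching word in the scan region, A's 'len(result) >= limit' break
-- accidentally returns just the first match, while B returns [] because a negative limit
-- naturally means no results.
def D_search_with_prefix (words : List String) (prefix_ : String) (limit : Int) : Prop :=
  limit < 0 ∧
    ((words.takeWhile (fun w =>
        !(!(PySem.Chars.startswith w.toList (PySem.Chars.lower prefix_.toList)) &&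
          PySem.Chars.strLt (PySem.Chars.lower prefix_.toList) w.toList))).any
      (fun w => PySem.Chars.startswith w.toList (PySem.Chars.lower prefix_.toList))) = true
instance (words : List String) (prefix_ : String) (limit : Int) : Decidable (D_search_with_prefix words prefix_ limit) := by unfold D_search_with_prefix; infer_instance

def Spec_search_with_prefix (words : List String) (prefix_ : String) (limit : Int) (out : List String) : Prop := ¬ D_search_with_prefix words prefix_ limit → out = search_with_prefix_alt words prefix_ limit
instance (words : List String) (prefix_ : String) (limit : Int) (out : List String) : Decidable (Spec_search_with_prefix words prefix_ limit out) := by unfold Spec_search_with_prefix; infer_instance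

def pvDiffWitness_search_with_prefix : List String × String × Int := (["ab"], "a", -1)
def pvDiffWitnessOut_search_with_prefix : (List String) × (List String) := (["ab"], [])

-- ===== CLAIM (what is proved, stated in full; the proofs are below) =====
def Claim_unchanged_search_with_prefix : Prop := ∀ (words : List String) (prefix_ : String) (limit : Int), Dom_search_with_prefix words prefix_ limit → Spec_search_with_prefix words prefix_ limit (search_with_prefix words prefix_ limit)
def Claim_changed_search_with_prefix : Prop := Dom_search_with_prefix (pvDiffWitness_search_with_prefix.1) (pvDiffWitness_search_with_prefix.2.1) (pvDiffWitness_search_with_prefix.2.2) ∧ D_search_with_prefix (pvDiffWitness_search_with_prefix.1) (pvDiffWitness_search_with_prefix.2.1) (pvDiffWitness_search_with_prefix.2.2) ∧ search_with_prefix (pvDiffWitness_search_with_prefix.1) (pvDiffWitness_search_with_prefix.2.1) (pvDiffWitness_search_with_prefix.2.2) = pvDiffWitnessOut_search_with_prefix.1 ∧ search_with_prefix_alt (pvDiffWitness_search_with_prefix.1) (pvDiffWitness_search_with_prefix.2.1) (pvDiffWitness_search_with_prefix.2.2) = pvDiffWitnessOut_search_with_prefix.2 ∧ pvDiffWitnessOut_search_with_prefix.1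 ≠ pvDiffWitnessOut_search_with_prefix.2
def Claim_exact_search_with_prefix : Prop := ∀ (words : List String) (prefix_ : String) (limit : Int), Dom_search_with_prefix words prefix_ limit → D_search_with_prefix words prefix_ limit → search_with_prefix words prefix_ limit ≠ search_with_prefix_alt words prefix_ limit

-- ===== LEMMAS AND PROOFS =====

-- A's helper, characterised by startswith and lexicographic comparison
lemma pyStrStartsWith_eq (p w : List Char) :
    pyStrStartsWith p w =
      (PySem.Chars.startswith w p,
       if PySem.Chars.startswith w p then none else some (PySem.Chars.strLt p w)) := by
  induction p generalizing w with
  | nil => simp [pyStrStartsWith, PySem.Chars.startswith, List.isPrefixOf]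
  | cons c ps ih =>
    cases w with
    | nil => simp [pyStrStartsWith, PySem.Chars.startswith, List.isPrefixOf, PySem.Chars.strLt]
    | cons d ws =>
      rcases lt_trichotomy c d with h | h | h
      · have hne : c ≠ d := ne_of_lt h
        simp [pyStrStartsWith, h, PySem.Chars.startswith, List.isPrefixOf, hne,
          PySem.Chars.strLt, List.cons_lt_cons_iff]
      · subst h
        have hirr : ¬ c < c := lt_irrefl c
        simp only [pyStrStartsWith, hirr, if_false, ih ws]
        simp [PySem.Chars.startswith, List.isPrefixOf, PySem.Chars.strLt]
      · have hne : c ≠ d := (ne_of_lt h).symm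
        have h2 : ¬ c < d := not_lt_of_gt h
        simp [pyStrStartsWith, h, h2, PySem.Chars.startswith, List.isPrefixOf, hne,
          PySem.Chars.strLt, List.cons_lt_cons_iff]

-- proof-side abbreviations for the two predicates of B
def pvMatch (p : List Char) (w : String) : Bool := PySem.Chars.startswith w.toList p
def pvNotPast (p : List Char) (w : String) : Bool :=
  !(!(PySem.Chars.startswith w.toList p) && PySem.Chars.strLt p w.toList)

lemma pvNotPast_of_match {p : List Char} {w : String} (h : pvMatch p w = true) :
    pvNotPast p w = true := by
  simp only [pvMatch] at h
  simp [pvNotPast, h]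

-- fused countdown form of A's loop
def gA (p : List Char) : Int → List String → List String
  | _, [] => []
  | r, w :: ws =>
    if pvMatch p w then (if r - 1 ≤ 0 then [w] else w :: gA p (r - 1) ws)
    else if pvNotPast p w then gA p r ws else []

lemma searchLoopA_eq_gA (p : List Char) (limit : Int) :
    ∀ (ws acc : List String), searchLoopA p limit ws acc = acc ++ gA p (limit - acc.length) ws := by
  intro ws
  induction ws with
  | nil => intro acc; simp [searchLoopA, gA]
  | cons w rest ih =>
    intro acc
    rw [searchLoopA, pyStrStartsWith_eq]
    by_cases h : PySem.Chars.startswith w.toList p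
    · simp only [h, if_true]
      by_cases hb : limit ≤ ((acc ++ [w]).length : Int)
      · rw [if_pos hb]
        have hb' : limit - (acc.length : Int) - 1 ≤ 0 := by simp at hb; omega
        simp [gA, pvMatch, h, hb']
      · rw [if_neg hb, ih (acc ++ [w])]
        have hb' : ¬ (limit - (acc.length : Int) - 1 ≤ 0) := by simp at hb; omega
        simp only [gA, pvMatch, h, if_true, hb', if_false]
        have hl : ((acc ++ [w]).length : Int) = (acc.length : Int) + 1 := by simp
        rw [hl, show limit - ((acc.length : Int) + 1) = limit - (acc.length : Int) - 1 from by
          ring]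
        simp
    · simp only [h, Bool.false_eq_true, if_false]
      by_cases h2 : PySem.Chars.strLt p w.toList
      · simp [h2, gA, pvMatch, pvNotPast, h]
      · simp only [h2, ih acc]
        simp [gA, pvMatch, pvNotPast, h, h2]

lemma findEndB_eq (p : List Char) :
    ∀ (ws : List String) (i d : Nat), d = i + ws.length →
      findEndB p ws i d = i + (ws.takeWhile (pvNotPast p)).length := by
  intro ws
  induction ws with
  | nil => intro i d hd; simpa [findEndB] using hd
  | cons w rest ih =>
    intro i d hd
    by_cases h : (!(PySem.Chars.startswith w.toList p) && PySem.Chars.strLt p w.toList) = true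
    · have hnp : ¬ pvNotPast p w = true := by simp only [pvNotPast, h]; simp
      rw [findEndB, if_pos h, List.takeWhile_cons_of_neg hnp]
      simp
    · have hnp : pvNotPast p w = true := by
        simp only [pvNotPast]
        cases hs : PySem.Chars.startswith w.toList p <;>
          cases hl : PySem.Chars.strLt p w.toList <;> simp_all
      rw [findEndB, if_neg h, ih (i + 1) d (by simp only [List.length_cons] at hd; omega),
        List.takeWhile_cons_of_pos hnp]
      simp only [List.length_cons]
      omega

lemma take_takeWhile_length {α : Type} (q : α → Bool) (l : List α) :
    l.take (l.takeWhile q).length = l.takeWhile q := by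
  induction l with
  | nil => rfl
  | cons x xs ih =>
    by_cases h : q x = true
    · rw [List.takeWhile_cons_of_pos h, List.length_cons, List.take_succ_cons, ih]
    · rw [List.takeWhile_cons_of_neg h]
      rfl

lemma gA_pos (p : List Char) :
    ∀ (r : Int), 1 ≤ r → ∀ (ws : List String),
      gA p r ws = ((ws.takeWhile (pvNotPast p)).filter (pvMatch p)).take r.toNat := by
  intro r hr ws
  induction ws generalizing r with
  | nil => simp [gA]
  | cons w rest ih =>
    by_cases h : pvMatch p w = true
    · have hnp : pvNotPast p w = true := pvNotPast_of_match h
      rw [List.takeWhile_cons_of_pos hnp, List.filter_cons_of_pos h]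
      by_cases h1 : r - 1 ≤ 0
      · have hr1 : r = 1 := by omega
        simp [gA, h, hr1]
      · have hr' : 1 ≤ r - 1 := by omega
        have htn : r.toNat = (r - 1).toNat + 1 := by omega
        rw [gA, if_pos h, if_neg h1, ih (r - 1) hr', htn, List.take_succ_cons]
    · by_cases h2 : pvNotPast p w = true
      · rw [List.takeWhile_cons_of_pos h2, List.filter_cons_of_neg h, gA, if_neg h, if_pos h2,
          ih r hr]
      · rw [List.takeWhile_cons_of_neg h2, gA, if_neg h, if_neg h2]
        simp

lemma gA_no_match (p : List Char) (r : Int) :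
    ∀ (ws : List String), ((ws.takeWhile (pvNotPast p)).filter (pvMatch p)) = [] →
      gA p r ws = [] := by
  intro ws
  induction ws with
  | nil => intro _; simp [gA]
  | cons w rest ih =>
    intro hnil
    by_cases h : pvMatch p w = true
    · have hnp : pvNotPast p w = true := pvNotPast_of_match h
      rw [List.takeWhile_cons_of_pos hnp, List.filter_cons_of_pos h] at hnil
      exact absurd hnil (by simp)
    · by_cases h2 : pvNotPast p w = true
      · rw [List.takeWhile_cons_of_pos h2, List.filter_cons_of_neg h] at hnil
        rw [gA, if_neg h, if_pos h2]
        exact ih hnil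
      · rw [gA, if_neg h, if_neg h2]

lemma gA_ne_nil (p : List Char) (r : Int) :
    ∀ (ws : List String), ((ws.takeWhile (pvNotPast p)).any (pvMatch p)) = true →
      gA p r ws ≠ [] := by
  intro ws
  induction ws with
  | nil => intro hany; simp at hany
  | cons w rest ih =>
    intro hany
    by_cases h : pvMatch p w = true
    · by_cases h1 : r - 1 ≤ 0 <;> simp [gA, h, h1]
    · by_cases h2 : pvNotPast p w = true
      · rw [List.takeWhile_cons_of_pos h2, List.any_cons] at hany
        rw [gA, if_neg h, if_pos h2]
        exact ih (by simpa [h] using hany)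
      · rw [List.takeWhile_cons_of_neg h2] at hany
        simp at hany

-- the inline predicates of D_ and of port B are exactly pvNotPast / pvMatch
lemma pred_notPast_eq (p : List Char) :
    (fun w : String => !(!(PySem.Chars.startswith w.toList p) && PySem.Chars.strLt p w.toList))
      = pvNotPast p := rfl

lemma pred_match_eq (p : List Char) :
    (fun w : String => PySem.Chars.startswith w.toList p) = pvMatch p := rfl

-- ===== VERDICT (by name: the statements are the Claim_ definitions above) =====
theorem search_with_prefix_spec : Claim_unchanged_search_with_prefix := by
  intro words prefix_ limit _ hnD
  unfold D_search_with_prefix at hnD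
  rw [pred_notPast_eq, pred_match_eq] at hnD
  unfold search_with_prefix search_with_prefix_alt
  set p := PySem.Chars.lower prefix_.toList with hp
  by_cases h0 : limit = 0
  · simp [h0]
  · by_cases hneg : limit ≤ 0
    · -- limit < 0, and ¬D_ gives: no match in the region
      rw [if_neg h0, if_pos hneg]
      have hany : ¬ ((words.takeWhile (pvNotPast p)).any (pvMatch p)) = true :=
        fun hc => hnD ⟨by omega, hc⟩
      have hfil : ((words.takeWhile (pvNotPast p)).filter (pvMatch p)) = [] := by
        rw [List.filter_eq_nil_iff]
        intro x hx
        exact fun hm => hany (List.any_eq_true.mpr ⟨x, hx, hm⟩)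
      rw [searchLoopA_eq_gA]
      simpa using gA_no_match p (limit - (([] : List String).length : Int)) words hfil
    · -- limit ≥ 1: A's fused loop equals B's staged region/filter/truncate passes
      rw [if_neg h0, if_neg hneg]
      have he : findEndB p words 0 words.length = (words.takeWhile (pvNotPast p)).length := by
        simpa using findEndB_eq p words 0 words.length (by simp)
      rw [searchLoopA_eq_gA]
      simp only [List.nil_append, List.length_nil, Nat.cast_zero, Int.sub_zero]
      rw [gA_pos p limit (by omega) words, he, PySem.List.slice_to_natCast,
        take_takeWhile_length, PySem.List.slice_to _ (by omega : (0 : Int) ≤ limit),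
        pred_match_eq]

theorem search_with_prefix_changed : Claim_changed_search_with_prefix := by
  unfold Claim_changed_search_with_prefix; decide

theorem search_with_prefix_tight : Claim_exact_search_with_prefix := by
  intro words prefix_ limit _ hD
  unfold D_search_with_prefix at hD
  rw [pred_notPast_eq, pred_match_eq] at hD
  obtain ⟨hneg, hany⟩ := hD
  unfold search_with_prefix search_with_prefix_alt
  rw [if_neg (by omega : ¬ limit = 0), if_pos (by omega : limit ≤ 0), searchLoopA_eq_gA]
  simpa using gA_ne_nil (PySem.Chars.lower prefix_.toList)
    (limit - (([] : List String).length : Int)) words hany
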